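-- pv_equiv track=rewrite | github.com/VerbalAid/Medical_Justifications_Human_vs_LLM_-Corpus_Linguistics- | pipeline/graph_viz.py | collect_ancestor_nodes_hop_limited
-- ===== SOURCE A (Python) =====
-- from collections import deque
--
-- def collect_ancestor_nodes(seeds: set[str], child_to_parents: dict[str, list[str]]) -> set[str]:
--     """Full upward closure to the root (legacy behaviour; can be huge)."""
--     out: set[str] = set()
--     stack = list(seeds)
--     while stack:
--         n = stack.pop()
--         if n in out:
--             continue
--         out.add(n)
--         stack.extend(child_to_parents.get(n, []))
--     return out
--
-- def collect_ancestor_nodes_hop_limited(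
--     seeds: set[str],
--     child_to_parents: dict[str, list[str]],
--     max_hops: int,
-- ) -> set[str]:
--     """Ancestors within ``max_hops`` parent edges of any seed (readable subgraphs)."""
--     if max_hops < 0:
--         return collect_ancestor_nodes(seeds, child_to_parents)
--     dist: dict[str, int] = {}
--     dq: deque[tuple[str, int]] = deque()
--     for s in seeds:
--         dist[s] = 0
--         dq.append((s, 0))
--     out: set[str] = set()
--     while dq:
--         n, d = dq.popleft()
--         if dist.get(n, 10**9) != d:
--             continue
--         out.add(n)
--         if d >= max_hops:
--             continue
--         for p in child_to_parents.get(n, []):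
--             nd = d + 1
--             if nd > max_hops:
--                 continue
--             if p not in dist or nd < dist[p]:
--                 dist[p] = nd
--                 dq.append((p, nd))
--     return out
-- ===== SOURCE B (Python) =====
-- def collect_ancestor_nodes(seeds, child_to_parents):
--     """Full upward closure to the root (legacy behaviour; can be huge)."""
--     out = set()
--     stack = list(seeds)
--     while stack:
--         n = stack.pop()
--         if n in out:
--             continue
--         out.add(n)
--         stack.extend(child_to_parents.get(n, []))
--     return out
--
--
-- def collect_ancestor_nodes_hop_limited(seeds, child_to_parents, max_hops):
--     """Ancestors within ``max_hops`` parent edges of any seed (readable subgraphs)."""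
--     if max_hops < 0:
--         return collect_ancestor_nodes(seeds, child_to_parents)
--     out = set(seeds)
--     frontier = set(seeds)
--     for _ in range(max_hops):
--         if not frontier:
--             break
--         next_frontier = set()
--         for n in frontier:
--             for p in child_to_parents.get(n, []):
--                 if p not in out:
--                     out.add(p)
--                     next_frontier.add(p)
--         frontier = next_frontier
--     return out
-- ===== Notes on version B (the rewrite author's own statement) =====
-- stated objective: simpler
-- what changed: Replaces the distance-map-plus-deque BFS with stale-entry checks by a level-synchronous BFS: a visited set and a frontier set expanded exactly max_hops times (with early break on an empty frontier); the dist dict, the deque of (node, depth) pairs and the stale/relaxation logic disappear.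
import Mathlib
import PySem

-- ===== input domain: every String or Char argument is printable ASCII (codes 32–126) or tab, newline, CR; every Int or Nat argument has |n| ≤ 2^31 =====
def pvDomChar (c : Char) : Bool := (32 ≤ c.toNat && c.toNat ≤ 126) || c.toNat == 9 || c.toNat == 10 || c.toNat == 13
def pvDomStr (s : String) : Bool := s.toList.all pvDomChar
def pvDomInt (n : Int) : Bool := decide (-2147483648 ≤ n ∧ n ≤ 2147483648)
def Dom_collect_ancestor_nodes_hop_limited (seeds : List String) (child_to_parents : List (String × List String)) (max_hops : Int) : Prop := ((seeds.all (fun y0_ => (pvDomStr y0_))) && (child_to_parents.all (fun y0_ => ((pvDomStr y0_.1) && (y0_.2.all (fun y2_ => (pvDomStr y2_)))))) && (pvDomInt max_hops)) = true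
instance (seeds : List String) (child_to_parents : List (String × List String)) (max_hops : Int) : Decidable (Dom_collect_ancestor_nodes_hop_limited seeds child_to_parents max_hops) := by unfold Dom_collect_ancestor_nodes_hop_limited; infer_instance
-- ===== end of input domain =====

-- B replaces A's dist-map/deque BFS with stale-entry checks by a level-synchronous BFS over a
-- visited set and a frontier set (objective: simpler; same asymptotic cost).

-- ===== PORT A =====
-- Helper collect_ancestor_nodes (full upward closure), used by BOTH Pythons on max_hops < 0
-- exactly as written there.  Python pops from the END of `stack`; this Lean list keeps the top of
-- the Python stack at its HEAD (so the initial stack is seeds.reverse and stack.extend(ps) pushes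
-- ps.reverse).  The while-loop runs on fuel: every iteration pops one pushed element and the number
-- of pushes is at most seeds.length plus the total length of all parent lists, so the fuel below
-- is never exhausted.  The returned set's membership does not depend on the (unmodelled) Python
-- set-iteration order of `seeds`.
def pvClosureLoop (ctp : PySem.Dict String (List String)) :
    Nat → List String → PySem.Set String → PySem.Set String
  | 0, _, out => out
  | _ + 1, [], out => out
  | fuel + 1, n :: stack, out =>
    if PySem.Set.contains out n then pvClosureLoop ctp fuel stack out
    else pvClosureLoop ctp fuel ((ctp.getD n []).reverse ++ stack) (PySem.Set.add out n)

def pvClosure (seeds : List String) (ctp : PySem.Dict String (List String)) : PySem.Set String :=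
  pvClosureLoop ctp (seeds.length + (ctp.values.flatMap id).length + 1) seeds.reverse PySem.Set.empty

def pvBig : Int := 10 ^ 9

-- the inner `for p in child_to_parents.get(n, [])` of A.  Python's short-circuit
-- `p not in dist or nd < dist[p]` is `!contains p || nd < getD p pvBig`: when p is absent the
-- left disjunct is true and the (defaulted) right one is irrelevant, exactly as in Python.
def pvAExpand (ctp : PySem.Dict String (List String)) (mh d : Int) (n : String)
    (st : PySem.Dict String Int × List (String × Int)) :
    PySem.Dict String Int × List (String × Int) :=
  (ctp.getD n []).foldl (fun st p =>
    let nd := d + 1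
    if nd > mh then st
    else if !(st.1.contains p) || decide (nd < st.1.getD p pvBig) then
      (st.1.insert p nd, st.2 ++ [(p, nd)])
    else st) st

-- A's `while dq:` loop; popleft is taking the head, append goes to the end.  Fuel: each iteration
-- pops one enqueued pair, and every enqueue after the initial seeds adds a previously absent key
-- to dist, so seeds.length + (number of parent occurrences) + 1 iterations always suffice.
def pvALoop (ctp : PySem.Dict String (List String)) (mh : Int) :
    Nat → PySem.Dict String Int → List (String × Int) → PySem.Set String → PySem.Set String
  | 0, _, _, out => out
  | _ + 1, _, [], out => out
  | fuel + 1, dist, (n, d) :: rest, out =>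
    if dist.getD n pvBig ≠ d then pvALoop ctp mh fuel dist rest out
    else
      let out' := PySem.Set.add out n
      if d ≥ mh then pvALoop ctp mh fuel dist rest out'
      else
        let st := pvAExpand ctp mh d n (dist, rest)
        pvALoop ctp mh fuel st.1 st.2 out'

def collect_ancestor_nodes_hop_limited (seeds : List String) (child_to_parents : List (String × List String)) (max_hops : Int) : List String :=
  let g := PySem.Dict.ofList child_to_parents
  if max_hops < 0 then pvClosure seeds g
  else
    let init := seeds.foldl (fun (st : PySem.Dict String Int × List (String × Int)) s =>
      (st.1.insert s 0, st.2 ++ [(s, 0)])) (PySem.Dict.empty, [])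
    pvALoop g max_hops (seeds.length + (g.values.flatMap id).length + 1) init.1 init.2 PySem.Set.empty

-- ===== PORT B =====
-- visiting one frontier node: walk its parents, putting unseen ones into out and next_frontier
def pvBVisit (ctp : PySem.Dict String (List String))
    (st : PySem.Set String × PySem.Set String) (n : String) :
    PySem.Set String × PySem.Set String :=
  (ctp.getD n []).foldl (fun st p =>
    if PySem.Set.contains st.1 p then st
    else (PySem.Set.add st.1 p, PySem.Set.add st.2 p)) st

-- `for _ in range(max_hops):` with the early `break` on an empty frontier
def pvBLoop (ctp : PySem.Dict String (List String)) :
    Nat → PySem.Set String → PySem.Set String → PySem.Set String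
  | 0, out, _ => out
  | k + 1, out, frontier =>
    if frontier.isEmpty then out
    else
      let st := frontier.foldl (pvBVisit ctp) (out, PySem.Set.empty)
      pvBLoop ctp k st.1 st.2

def collect_ancestor_nodes_hop_limited_alt (seeds : List String) (child_to_parents : List (String × List String)) (max_hops : Int) : List String :=
  let g := PySem.Dict.ofList child_to_parents
  if max_hops < 0 then pvClosure seeds g
  else pvBLoop g max_hops.toNat (PySem.Set.ofList seeds) (PySem.Set.ofList seeds)

-- ===== PRECONDITION & SPEC =====
-- `seeds` is a Python set[str]: under the type convention it is a list of DISTINCT elements, so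
-- Pre_ only states that convention (it excludes no input the Python function can receive).
def Pre_collect_ancestor_nodes_hop_limited (seeds : List String) (child_to_parents : List (String × List String)) (max_hops : Int) : Prop :=
  seeds.Nodup

instance (seeds : List String) (child_to_parents : List (String × List String)) (max_hops : Int) : Decidable (Pre_collect_ancestor_nodes_hop_limited seeds child_to_parents max_hops) := by unfold Pre_collect_ancestor_nodes_hop_limited; infer_instance

def pvWitness_collect_ancestor_nodes_hop_limited : List String × (List (String × List String)) × Int :=
  (["a"], [("a", ["b", "c"]), ("b", ["d"])], 1)

def Spec_collect_ancestor_nodes_hop_limited (seeds : List String) (child_to_parents : List (String × List String)) (max_hops : Int) (out : List String) : Prop := out = collect_ancestor_nodes_hop_limited_alt seeds child_to_parents max_hops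
instance (seeds : List String) (child_to_parents : List (String × List String)) (max_hops : Int) (out : List String) : Decidable (Spec_collect_ancestor_nodes_hop_limited seeds child_to_parents max_hops out) := by unfold Spec_collect_ancestor_nodes_hop_limited; infer_instance

-- ===== CLAIM (what is proved, stated in full; the proofs are below) =====
def Claim_equal_collect_ancestor_nodes_hop_limited : Prop := ∀ (seeds : List String) (child_to_parents : List (String × List String)) (max_hops : Int), Dom_collect_ancestor_nodes_hop_limited seeds child_to_parents max_hops → Pre_collect_ancestor_nodes_hop_limited seeds child_to_parents max_hops → Spec_collect_ancestor_nodes_hop_limited seeds child_to_parents max_hops (collect_ancestor_nodes_hop_limited seeds child_to_parents max_hops)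


-- ===== LEMMAS AND PROOFS =====

-- `contains` of a Dict is definedness of `get?`
theorem pvContainsIff {ν : Type} (d : PySem.Dict String ν) (k : String) :
    d.contains k = (d.get? k).isSome := by
  simp only [PySem.Dict.contains, PySem.Dict.get?, Option.isSome_map]
  induction d.items with
  | nil => rfl
  | cons a l ih => cases h : a.1 == k <;> simp [List.find?, h, ih]

theorem pvSetAddNotMem (s : List String) (x : String) (h : x ∉ s) : PySem.Set.add s x = s ++ [x] := by
  simp [PySem.Set.add, PySem.Set.contains, h]

-- a parent produced by .get(n, []) occurs among the dict's values
theorem pvGetDSub (g : PySem.Dict String (List String)) (n x : String)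
    (hx : x ∈ g.getD n []) : x ∈ g.values.flatMap id := by
  unfold PySem.Dict.getD at hx
  cases hfind : g.get? n with
  | none => simp [hfind] at hx
  | some l =>
    simp only [hfind, Option.getD_some] at hx
    unfold PySem.Dict.get? at hfind
    obtain ⟨p, hp, hpl⟩ := Option.map_eq_some_iff.mp hfind
    have hmem : p.2 ∈ g.values := List.mem_map_of_mem (List.mem_of_find?_eq_some hp)
    rw [hpl] at hmem
    exact List.mem_flatMap.mpr ⟨l, hmem, by simpa using hx⟩

-- set(xs) is xs itself when xs has no duplicates
theorem pvFoldAdd (xs : List String) : ∀ acc : List String, (∀ x ∈ xs, x ∉ acc) → xs.Nodup →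
    xs.foldl PySem.Set.add acc = acc ++ xs := by
  induction xs with
  | nil => simp
  | cons s rest ih =>
    intro acc hd hn
    rw [List.nodup_cons] at hn
    rw [List.foldl_cons, pvSetAddNotMem acc s (hd s (by simp))]
    rw [ih (acc ++ [s]) ?_ hn.2]
    · simp
    · intro x hx
      simp only [List.mem_append, List.mem_singleton]
      rintro (h | h)
      · exact hd x (by simp [hx]) h
      · exact hn.1 (h ▸ hx)

theorem pvOfListNodup (xs : List String) (h : xs.Nodup) : PySem.Set.ofList xs = xs := by
  have := pvFoldAdd xs [] (by simp) h
  simpa [PySem.Set.ofList, PySem.Set.empty] using this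

-- number of dict values not yet discovered: the fuel budget still needed
def pvPool (ctp : PySem.Dict String (List String)) (outB : List String) : Nat :=
  ((ctp.values.flatMap id).toFinset \ outB.toFinset).card

-- the simulation invariant tying A's (dist, dq = F ++ N, out) to B's (out, frontier) mid-level:
-- F is the unprocessed remainder of level d, N the next level discovered so far
structure pvInv (ctp : PySem.Dict String (List String)) (mh d : Int)
    (dist : PySem.Dict String Int) (F N : List (String × Int))
    (outA outB : List String) : Prop where
  hd0 : 0 ≤ d
  hdm : d ≤ mh
  hF : ∀ e ∈ F, e.2 = d
  hN : ∀ e ∈ N, e.2 = d + 1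
  hout : outB = outA ++ F.map Prod.fst ++ N.map Prod.fst
  hnd : outB.Nodup
  hmem : ∀ x, (dist.get? x).isSome ↔ x ∈ outB
  hFv : ∀ e ∈ F, dist.get? e.1 = some d
  hNv : ∀ e ∈ N, dist.get? e.1 = some (d + 1)
  hAv : ∀ x ∈ outA, ∃ v, dist.get? x = some v ∧ v ≤ d
  hlast : d < mh ∨ N = []

-- the two inner parent-loops, run over the same list from corresponding states, stay in
-- correspondence: the same fresh nodes `news` are appended everywhere
theorem pvExpandCorr (mh d : Int) (hdm : d < mh) (ps : List String) :
    ∀ (dist : PySem.Dict String Int) (acc : List (String × Int)) (out f : List String),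
    (∀ x, (dist.get? x).isSome ↔ x ∈ out) →
    (∀ x v, dist.get? x = some v → v ≤ d + 1) →
    (∀ x ∈ f, x ∈ out) →
    ∃ news : List String,
      news.Nodup ∧ (∀ x ∈ news, x ∉ out ∧ x ∈ ps) ∧
      (ps.foldl (fun st p =>
        let nd := d + 1
        if nd > mh then st
        else if !(st.1.contains p) || decide (nd < st.1.getD p pvBig) then
          (st.1.insert p nd, st.2 ++ [(p, nd)])
        else st) (dist, acc)) =
        ((news.foldl (fun dd p => dd.insert p (d + 1)) dist), acc ++ news.map (fun p => (p, d + 1))) ∧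
      (∀ x, (news.foldl (fun dd p => dd.insert p (d + 1)) dist).get? x
          = if x ∈ news then some (d + 1) else dist.get? x) ∧
      (ps.foldl (fun st p =>
        if PySem.Set.contains st.1 p then st
        else (PySem.Set.add st.1 p, PySem.Set.add st.2 p)) (out, f)) = (out ++ news, f ++ news) := by
  induction ps with
  | nil =>
    intro dist acc out f hlink hvals hsub
    exact ⟨[], by simp, by simp, by simp, by simp, by simp⟩
  | cons p ps ih =>
    intro dist acc out f hlink hvals hsub
    simp only [List.foldl_cons]
    by_cases hp : p ∈ out
    · -- already seen: both steps are the identity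
      obtain ⟨v, hv⟩ := Option.isSome_iff_exists.mp ((hlink p).mpr hp)
      have hvle := hvals p v hv
      have hcont : dist.contains p = true := by rw [pvContainsIff, hv]; rfl
      have hgetD : dist.getD p pvBig = v := by simp [PySem.Dict.getD, hv]
      rw [if_neg (by omega : ¬ (d + 1 > mh)),
        if_neg (show ¬ ((!dist.contains p || decide (d + 1 < dist.getD p pvBig)) = true) by
          rw [hcont, hgetD]; simp; omega),
        if_pos (show PySem.Set.contains out p = true by simp [PySem.Set.contains, hp])]
      obtain ⟨news, h1, h2, h3, h4, h5⟩ := ih dist acc out f hlink hvals hsub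
      exact ⟨news, h1, fun x hx => ⟨(h2 x hx).1, by simp [(h2 x hx).2]⟩, h3, h4, h5⟩
    · -- fresh parent: discovered on both sides
      have hnone : dist.get? p = none := by
        cases h : dist.get? p with
        | none => rfl
        | some v => exact absurd ((hlink p).mp (by simp [h])) hp
      have hcont : dist.contains p = false := by rw [pvContainsIff, hnone]; rfl
      have hpf : p ∉ f := fun h => hp (hsub p h)
      rw [if_neg (by omega : ¬ (d + 1 > mh)),
        if_pos (show (!dist.contains p || decide (d + 1 < dist.getD p pvBig)) = true by
          rw [hcont]; simp),
        if_neg (show ¬ (PySem.Set.contains out p = true) by simp [PySem.Set.contains, hp]),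
        pvSetAddNotMem out p hp, pvSetAddNotMem f p hpf]
      have hlink' : ∀ x, ((dist.insert p (d + 1)).get? x).isSome ↔ x ∈ out ++ [p] := by
        intro x
        rw [PySem.Dict.get?_insert]
        by_cases hx : x = p <;> simp [hx, hlink]
      have hvals' : ∀ x v, (dist.insert p (d + 1)).get? x = some v → v ≤ d + 1 := by
        intro x v h
        rw [PySem.Dict.get?_insert] at h
        by_cases hx : x = p
        · simp [hx] at h; omega
        · exact hvals x v (by simpa [hx] using h)
      have hsub' : ∀ x ∈ f ++ [p], x ∈ out ++ [p] := by
        intro x hx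
        rcases List.mem_append.mp hx with h | h
        · exact List.mem_append.mpr (Or.inl (hsub x h))
        · exact List.mem_append.mpr (Or.inr h)
      obtain ⟨news, h1, h2, h3, h4, h5⟩ := ih (dist.insert p (d + 1)) (acc ++ [(p, d + 1)]) (out ++ [p]) (f ++ [p]) hlink' hvals' hsub'
      have hpn : p ∉ news := fun h => (h2 p h).1 (by simp)
      refine ⟨p :: news, by simp [h1, hpn], ?_, ?_, ?_, ?_⟩
      · intro x hx
        rcases List.mem_cons.mp hx with h | h
        · exact ⟨h ▸ hp, by simp [h]⟩
        · exact ⟨fun hxo => (h2 x h).1 (by simp [hxo]), by simp [(h2 x h).2]⟩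
      · rw [h3]; simp
      · intro x
        rw [List.foldl_cons, h4 x]
        by_cases hx : x ∈ news
        · simp [hx]
        · by_cases hxp : x = p
          · simp [hxp, PySem.Dict.get?_insert_self]
          · simp [hx, hxp, PySem.Dict.get?_insert_of_ne dist (d + 1) hxp]
      · rw [h5]; simp

-- main simulation: draining A's queue from a mid-level state computes exactly B's remaining work
theorem pvMaster (ctp : PySem.Dict String (List String)) (mh : Int)
    (fuel : Nat) (d : Int) (dist : PySem.Dict String Int)
    (F N : List (String × Int)) (outA outB : List String)
    (hinv : pvInv ctp mh d dist F N outA outB)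
    (hfuel : (F ++ N).length + pvPool ctp outB ≤ fuel) :
    pvALoop ctp mh fuel dist (F ++ N) outA =
      (if d < mh then
        pvBLoop ctp (mh - d - 1).toNat
          ((F.map Prod.fst).foldl (pvBVisit ctp) (outB, N.map Prod.fst)).1
          ((F.map Prod.fst).foldl (pvBVisit ctp) (outB, N.map Prod.fst)).2
      else outB) := by
  obtain ⟨hd0, hdm, hF, hN, hout, hnd, hmem, hFv, hNv, hAv, hlast⟩ := hinv
  cases hFc : F with
  | nil =>
    cases hNc : N with
    | nil =>
      -- queue empty: A returns out, B's remaining loop is a no-op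
      subst hFc hNc
      have houtAB : outB = outA := by simpa using hout
      have hL : pvALoop ctp mh fuel dist [] outA = outA := by cases fuel <;> rfl
      have hR : ∀ (k : Nat) (o : PySem.Set String), pvBLoop ctp k o [] = o := by
        intro k o; cases k <;> rfl
      simp only [List.nil_append, List.map_nil, List.foldl_nil, hL]
      split <;> simp [hR, houtAB]
    | cons m N' =>
      -- level transition: A starts popping depth d+1; B enters its next hop iteration
      subst hFc hNc
      have hlt : d < mh := by
        rcases hlast with h | h
        · exact h
        · simp at h
      have hrec := pvMaster ctp mh fuel (d + 1) dist (m :: N') [] outA outB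
        ⟨by omega, by omega, hN, by simp, by simpa using hout, hnd, hmem, hNv, by simp,
          fun x hx => by
            obtain ⟨v, hv, hvle⟩ := hAv x hx
            exact ⟨v, hv, by omega⟩,
          Or.inr rfl⟩
        (by simpa using hfuel)
      simp only [List.append_nil] at hrec
      simp only [List.nil_append, List.map_nil, List.foldl_nil]
      rw [hrec]
      have hne : ((m :: N').map Prod.fst).isEmpty = false := by simp
      by_cases hlt2 : d + 1 < mh
      · rw [if_pos hlt2, if_pos hlt]
        have hk : (mh - d - 1).toNat = (mh - (d + 1) - 1).toNat + 1 := by omega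
        rw [hk]
        conv_rhs => rw [pvBLoop]
        rw [hne]
        simp only [Bool.false_eq_true, if_false]
        rfl
      · rw [if_neg hlt2, if_pos hlt]
        have hk : (mh - d - 1).toNat = 0 := by omega
        rw [hk]
        rfl
  | cons e F' =>
    obtain ⟨n, dn⟩ := e
    have hdn : dn = d := hF (n, dn) (by rw [hFc]; simp)
    subst dn
    subst hFc
    cases fuel with
    | zero => simp at hfuel
    | succ fuel' =>
      have hget : dist.get? n = some d := hFv (n, d) (by simp)
      have hgetD : dist.getD n pvBig = d := by simp [PySem.Dict.getD, hget]
      have hnA : n ∉ outA := by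
        have hnd2 := hnd
        rw [hout] at hnd2
        obtain ⟨h1, -, -⟩ := List.nodup_append.mp hnd2
        obtain ⟨-, -, hdisj⟩ := List.nodup_append.mp h1
        exact fun h => hdisj n h n (by simp) rfl
      have hadd : PySem.Set.add outA n = outA ++ [n] := pvSetAddNotMem outA n hnA
      simp only [List.cons_append, pvALoop]
      rw [if_neg (by simp [hgetD])]
      by_cases hge : d ≥ mh
      · -- at the hop limit: record n, expand nothing
        have hNnil : N = [] := by
          rcases hlast with h | h
          · omega
          · exact h
        subst hNnil
        rw [if_pos hge, hadd]
        have hrec := pvMaster ctp mh fuel' d dist F' [] (outA ++ [n]) outB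
          ⟨hd0, hdm, fun e he => hF e (by simp [he]), by simp,
            by rw [hout]; simp, hnd, hmem, fun e he => hFv e (by simp [he]), by simp,
            fun x hx => by
              rcases List.mem_append.mp hx with h | h
              · exact hAv x h
              · simp at h
                exact ⟨d, h ▸ hget, le_refl d⟩,
            Or.inr rfl⟩
          (by simp at hfuel ⊢; omega)
        simp only [List.append_nil] at hrec ⊢
        rw [hrec, if_neg (by omega : ¬ d < mh), if_neg (by omega : ¬ d < mh)]
      · -- expand n's parents; the two inner loops correspond
        have hlt : d < mh := by omega
        rw [if_neg hge, hadd]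
        have hvals : ∀ x v, dist.get? x = some v → v ≤ d + 1 := by
          intro x v hv
          have hx : x ∈ outB := (hmem x).mp (by simp [hv])
          rw [hout] at hx
          rcases List.mem_append.mp hx with hx | hx
          · rcases List.mem_append.mp hx with hx | hx
            · obtain ⟨w, hw, hwle⟩ := hAv x hx
              have hvw := Option.some.inj (hv.symm.trans hw)
              omega
            · obtain ⟨e, he, hex⟩ := List.mem_map.mp hx
              have h9 := hFv e he
              rw [hex] at h9
              have hvw := Option.some.inj (hv.symm.trans h9)
              omega
          · obtain ⟨e, he, hex⟩ := List.mem_map.mp hx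
            have h9 := hNv e he
            rw [hex] at h9
            have hvw := Option.some.inj (hv.symm.trans h9)
            omega
        have hsubf : ∀ x ∈ N.map Prod.fst, x ∈ outB := by
          intro x hx; rw [hout]; simp at hx ⊢; tauto
        obtain ⟨news, h1, h2, h3, h4, h5⟩ :=
          pvExpandCorr mh d hlt (ctp.getD n []) dist (F' ++ N) outB (N.map Prod.fst) hmem hvals hsubf
        have hAe : pvAExpand ctp mh d n (dist, F' ++ N) =
            ((news.foldl (fun dd p => dd.insert p (d + 1)) dist),
              (F' ++ N) ++ news.map (fun p => (p, d + 1))) := by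
          unfold pvAExpand
          exact h3
        have hBe : pvBVisit ctp (outB, N.map Prod.fst) n = (outB ++ news, N.map Prod.fst ++ news) := by
          unfold pvBVisit
          exact h5
        set dist' := news.foldl (fun dd p => dd.insert p (d + 1)) dist with hdist'
        have hnewsU : ∀ x ∈ news, x ∈ (ctp.values.flatMap id) := by
          intro x hx
          exact pvGetDSub ctp n x (h2 x hx).2
        have hnewsFresh : ∀ x ∈ news, x ∉ outB := fun x hx => (h2 x hx).1
        have hmemFout : ∀ e ∈ F', (e : String × Int).1 ∈ outB := by
          intro e he
          rw [hout]
          exact List.mem_append.mpr (Or.inl (List.mem_append.mpr (Or.inr (by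
            simp only [List.map_cons]
            exact List.mem_cons_of_mem _ (List.mem_map.mpr ⟨e, he, rfl⟩)))))
        have hmemNout : ∀ e ∈ N, (e : String × Int).1 ∈ outB := by
          intro e he
          rw [hout]
          exact List.mem_append.mpr (Or.inr (List.mem_map.mpr ⟨e, he, rfl⟩))
        have hnout : n ∈ outB := by
          rw [hout]
          exact List.mem_append.mpr (Or.inl (List.mem_append.mpr (Or.inr (by simp))))
        -- pool shrinks by exactly news.length
        have hpool : pvPool ctp (outB ++ news) + news.length = pvPool ctp outB := by
          unfold pvPool
          have hsubs : news.toFinset ⊆ (ctp.values.flatMap id).toFinset \ outB.toFinset := by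
            intro x hx
            rw [List.mem_toFinset] at hx
            rw [Finset.mem_sdiff, List.mem_toFinset, List.mem_toFinset]
            exact ⟨hnewsU x hx, hnewsFresh x hx⟩
          have : (outB ++ news).toFinset = outB.toFinset ∪ news.toFinset := by
            simp [List.toFinset_append]
          have h2 : (ctp.values.flatMap id).toFinset \ (outB.toFinset ∪ news.toFinset)
              = ((ctp.values.flatMap id).toFinset \ outB.toFinset) \ news.toFinset := by
            ext a
            simp only [Finset.mem_sdiff, Finset.mem_union]
            tauto
          rw [this, h2, Finset.card_sdiff, Finset.inter_eq_left.mpr hsubs,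
            List.toFinset_card_of_nodup h1]
          have h5 : news.length ≤ ((ctp.values.flatMap id).toFinset \ outB.toFinset).card := by
            rw [← List.toFinset_card_of_nodup h1]
            exact Finset.card_le_card hsubs
          omega
        have hinv' : pvInv ctp mh d dist' F' (N ++ news.map (fun p => (p, d + 1)))
            (outA ++ [n]) (outB ++ news) := by
          refine ⟨hd0, hdm, fun e he => hF e (by simp [he]), ?_, ?_, ?_, ?_, ?_, ?_, ?_, Or.inl hlt⟩
          · intro e he
            rcases List.mem_append.mp he with h | h
            · exact hN e h
            · obtain ⟨p, hp, hpe⟩ := List.mem_map.mp h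
              rw [← hpe]
          · rw [hout]
            simp [Function.comp_def]
          · rw [List.nodup_append]
            exact ⟨hnd, h1, fun a haB b hbN hab => hnewsFresh b hbN (hab ▸ haB)⟩
          · intro x
            rw [h4 x]
            by_cases hx : x ∈ news
            · simp [hx]
            · simp only [hx, if_false]
              rw [hmem x]
              simp [hx]
          · intro e he
            rw [h4 e.1, if_neg (fun hh => hnewsFresh e.1 hh (hmemFout e he))]
            exact hFv e (by simp [he])
          · intro e he
            rcases List.mem_append.mp he with h | h
            · rw [h4 e.1, if_neg (fun hh => hnewsFresh e.1 hh (hmemNout e h))]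
              exact hNv e h
            · obtain ⟨p, hp, hpe⟩ := List.mem_map.mp h
              rw [← hpe]
              simp only []
              rw [h4 p, if_pos hp]
          · intro x hx
            rcases List.mem_append.mp hx with h | h
            · obtain ⟨v, hv, hvle⟩ := hAv x h
              refine ⟨v, ?_, hvle⟩
              rw [h4 x, if_neg (fun hh => hnewsFresh x hh (by rw [hout]; exact List.mem_append.mpr (Or.inl (List.mem_append.mpr (Or.inl h)))))]
              exact hv
            · simp only [List.mem_singleton] at h
              subst h
              refine ⟨d, ?_, le_refl d⟩
              rw [h4 x, if_neg (fun hh => hnewsFresh x hh hnout)]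
              exact hget
        have hrec := pvMaster ctp mh fuel' d dist' F' (N ++ news.map (fun p => (p, d + 1)))
          (outA ++ [n]) (outB ++ news) hinv'
          (by
            simp only [List.length_append, List.length_map] at hfuel ⊢
            simp at hfuel
            omega)
        rw [hAe]
        simp only []
        rw [show (F' ++ N) ++ news.map (fun p => (p, d + 1)) = F' ++ (N ++ news.map (fun p => (p, d + 1))) from by simp]
        rw [hrec, if_pos hlt, if_pos hlt]
        simp only [List.map_cons, List.foldl_cons, hBe, List.map_append, List.map_map,
          Function.comp_def, List.map_id']
termination_by (fuel, N.length)

-- the seed loop of A builds dist = {s : 0} and dq = [(s, 0) …]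
theorem pvInitSnd (seeds : List String) (st : PySem.Dict String Int × List (String × Int)) :
    (seeds.foldl (fun (st : PySem.Dict String Int × List (String × Int)) s =>
      (st.1.insert s 0, st.2 ++ [(s, 0)])) st).2 = st.2 ++ seeds.map (fun s => (s, (0 : Int))) := by
  induction seeds generalizing st with
  | nil => simp
  | cons s rest ih => simp [ih]

theorem pvInitFst (seeds : List String) (st : PySem.Dict String Int × List (String × Int)) (x : String) :
    ((seeds.foldl (fun (st : PySem.Dict String Int × List (String × Int)) s =>
      (st.1.insert s 0, st.2 ++ [(s, 0)])) st).1).get? x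
      = if x ∈ seeds then some 0 else st.1.get? x := by
  induction seeds generalizing st with
  | nil => simp
  | cons s rest ih =>
    simp only [List.foldl_cons, ih, List.mem_cons]
    by_cases hr : x ∈ rest
    · simp [hr]
    · by_cases hs : x = s <;> simp [hr, hs, PySem.Dict.get?_insert]

-- ===== VERDICT (by name: the statement is the Claim_ definition above) =====
theorem collect_ancestor_nodes_hop_limited_spec : Claim_equal_collect_ancestor_nodes_hop_limited := by
  unfold Claim_equal_collect_ancestor_nodes_hop_limited
  intro seeds ctp mh _ hpre
  unfold Spec_collect_ancestor_nodes_hop_limited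
  unfold Pre_collect_ancestor_nodes_hop_limited at hpre
  unfold collect_ancestor_nodes_hop_limited collect_ancestor_nodes_hop_limited_alt
  by_cases hneg : mh < 0
  · simp [hneg]
  · simp only [if_neg hneg]
    rw [pvOfListNodup seeds hpre]
    set g := PySem.Dict.ofList ctp with hg
    rw [pvInitSnd seeds (PySem.Dict.empty, [])]
    simp only [List.nil_append, PySem.Set.empty]
    have hmaster := pvMaster g mh (seeds.length + (g.values.flatMap id).length + 1) 0
      ((seeds.foldl (fun (st : PySem.Dict String Int × List (String × Int)) s =>
        (st.1.insert s 0, st.2 ++ [(s, 0)])) (PySem.Dict.empty, [])).1)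
      (seeds.map (fun s => (s, (0 : Int)))) [] [] seeds
      ⟨by omega, by omega,
        fun e he => by obtain ⟨s, _, hse⟩ := List.mem_map.mp he; simp [← hse],
        by simp,
        by simp [Function.comp_def],
        hpre,
        fun x => by rw [pvInitFst]; by_cases hx : x ∈ seeds <;> simp [hx, PySem.Dict.empty, PySem.Dict.get?],
        fun e he => by
          obtain ⟨s, hs, hse⟩ := List.mem_map.mp he
          rw [pvInitFst]
          simp [← hse, hs],
        by simp,
        by simp,
        Or.inr rfl⟩
      (by
        simp only [List.append_nil, List.length_map]
        have h1 : pvPool g seeds ≤ (g.values.flatMap id).toFinset.card :=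
          Finset.card_le_card (Finset.sdiff_subset)
        have h2 : (g.values.flatMap id).toFinset.card ≤ (g.values.flatMap id).length :=
          List.toFinset_card_le _
        omega)
    simp only [List.append_nil] at hmaster
    rw [hmaster]
    by_cases hpos : 0 < mh
    · rw [if_pos hpos]
      obtain ⟨k, hk⟩ : ∃ k, mh.toNat = k + 1 := ⟨mh.toNat - 1, by omega⟩
      rw [hk]
      conv_rhs => rw [pvBLoop]
      cases hseeds : seeds with
      | nil =>
        have hR : ∀ kk : Nat, pvBLoop g kk [] [] = ([] : List String) := by
          intro kk; cases kk <;> rfl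
        simp only [List.map_nil, List.foldl_nil, List.isEmpty_nil, if_true, hR]
      | cons s rest =>
        simp only [List.isEmpty_cons, Bool.false_eq_true, if_false]
        have hk2 : (mh - 0 - 1).toNat = k := by omega
        rw [hk2]
        simp [Function.comp_def, PySem.Set.empty]
    · rw [if_neg hpos]
      have h0 : mh = 0 := by omega
      rw [h0]
      rfl
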